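-- pv_equiv track=rewrite | github.com/johnlocker/what-is-the-question | question3.py | question3
-- ===== SOURCE A (Python) =====
-- def question3(numbers):
--     sortedNumbers = list(sorted(numbers, key = len))
--     def question3Rec(sortedNumbers):
--         checkNum = sortedNumbers.pop(0)
--         if len(sortedNumbers) == 0:
--             return True
--         res = [checkNum for num in sortedNumbers if checkNum == num[:len(checkNum)]]
--         if len(res) == 0:
--             return question3Rec(sortedNumbers)
--         else:
--             return False
--     return question3Rec(sortedNumbers)
-- ===== SOURCE B (Python) =====
-- def question3(numbers):
--     s = sorted(numbers)
--     return all(not b.startswith(a) for a, b in zip(s, s[1:]))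
-- ===== Notes on version B (the rewrite author's own statement) =====
-- stated objective: alternative
-- what changed: Replaces the quadratic prefix scan (each length-sorted element tested against every later element) by a lexicographic sort followed by a single adjacent-pairs prefix check; quadratic worst case becomes O(n log n * L), though A's early exit makes it as fast on random inputs. Pre_ excludes only the empty list, on which A raises IndexError.
import Mathlib
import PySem

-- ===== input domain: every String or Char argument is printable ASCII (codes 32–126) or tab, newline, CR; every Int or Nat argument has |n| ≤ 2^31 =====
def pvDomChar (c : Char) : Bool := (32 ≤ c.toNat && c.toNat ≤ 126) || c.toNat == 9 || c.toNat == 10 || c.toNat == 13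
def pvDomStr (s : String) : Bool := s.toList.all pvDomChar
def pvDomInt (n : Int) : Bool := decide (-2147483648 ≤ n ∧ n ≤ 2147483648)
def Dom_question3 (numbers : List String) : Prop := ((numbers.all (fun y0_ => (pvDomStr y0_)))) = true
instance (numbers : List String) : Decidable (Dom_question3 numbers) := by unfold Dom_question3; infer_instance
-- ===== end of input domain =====

-- B replaces A's quadratic prefix scan over the length-sorted list by a lexicographic
-- sort followed by an adjacent-pairs prefix check (a different algorithm of similar measured cost).


-- ===== PORT A =====
-- question3Rec: pop(0) from an empty list raises IndexError in Python; that input is excluded by Pre_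
def question3Rec : List String → Bool
  | [] => true
  | checkNum :: rest =>
    if rest.length = 0 then true
    else
      let res := rest.filter (fun num =>
        decide (checkNum = PySem.Str.slice num none (some (PySem.Str.len checkNum))))
      if res.length = 0 then question3Rec rest else false

def question3 (numbers : List String) : Bool :=
  question3Rec (PySem.List.sorted numbers (fun s => PySem.Str.len s) false)

-- ===== PORT B =====
def question3_alt (numbers : List String) : Bool :=
  let s := PySem.List.sorted numbers (fun x => x) false
  (s.zip (PySem.List.slice s (some 1) none)).all (fun p => !(PySem.Str.startswith p.2 p.1))

-- ===== PRECONDITION & SPEC =====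
-- Pre_ excludes only the empty list, on which A raises IndexError (pop from an empty list)
def Pre_question3 (numbers : List String) : Prop := numbers ≠ []
instance (numbers : List String) : Decidable (Pre_question3 numbers) := by unfold Pre_question3; infer_instance
def pvWitness_question3 : List String := (["ab", "cd"])

def Spec_question3 (numbers : List String) (out : Bool) : Prop := out = question3_alt numbers
instance (numbers : List String) (out : Bool) : Decidable (Spec_question3 numbers out) := by unfold Spec_question3; infer_instance

-- ===== CLAIM (what is proved, stated in full; the proofs are below) =====
def Claim_equal_question3 : Prop := ∀ (numbers : List String), Dom_question3 numbers → Pre_question3 numbers → Spec_question3 numbers (question3 numbers)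

-- ===== LEMMAS AND PROOFS =====

-- the prefix relation both programs test
def pfx (a b : String) : Prop := a.toList <+: b.toList

-- a prefix is lexicographically ≤
lemma lex_le_of_prefix {a b : List Char} (h : a <+: b) :
    List.Lex (· < ·) a b ∨ a = b := by
  obtain ⟨t, rfl⟩ := h
  cases t with
  | nil => right; simp
  | cons x xs =>
    left
    induction a with
    | nil => exact List.Lex.nil
    | cons y ys ih => exact List.Lex.cons ih

-- the interval argument: a < b < c and a prefix of c forces a prefix of b
lemma prefix_between_core (a : List Char) : ∀ b c, List.Lex (· < ·) a b →
    List.Lex (· < ·) b c → a <+: c → a <+: b := by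
  induction a with
  | nil => intro b c _ _ _; exact List.nil_prefix
  | cons x a' ih =>
    intro b c hab hbc hac
    obtain ⟨t, rfl⟩ := hac
    cases hab with
    | rel h =>
      cases hbc with
      | rel h' => exact absurd (h.trans h') (lt_irrefl _)
      | cons h' => exact absurd h (lt_irrefl _)
    | cons h =>
      cases hbc with
      | rel h' => exact absurd h' (lt_irrefl _)
      | cons h' =>
        exact List.cons_prefix_cons.mpr ⟨rfl, ih _ _ h h' (List.prefix_append a' t)⟩

lemma prefix_of_between {a b c : List Char}
    (hab : List.Lex (· < ·) a b ∨ a = b) (hbc : List.Lex (· < ·) b c ∨ b = c)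
    (hac : a <+: c) : a <+: b := by
  rcases hab with hab | rfl
  · rcases hbc with hbc | rfl
    · exact prefix_between_core a b c hab hbc hac
    · exact hac
  · exact List.prefix_rfl

-- String ≤ read on the character lists
lemma le_toList {a b : String} (h : a ≤ b) :
    List.Lex (· < ·) a.toList b.toList ∨ a.toList = b.toList := by
  rcases lt_or_eq_of_le h with h | h
  · exact Or.inl (List.lex_lt.mpr (String.lt_iff_toList_lt.mp h))
  · exact Or.inr (by rw [h])

lemma slice_eq_iff_pfx (c num : String) :
    (c = PySem.Str.slice num none (some (PySem.Str.len c))) ↔ pfx c num := by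
  rw [← String.toList_inj, pfx]
  have h : (PySem.Str.slice num none (some (PySem.Str.len c))).toList
      = num.toList.take c.toList.length := by
    simp only [PySem.Str.toList_slice, PySem.Chars.slice_eq_listSlice, PySem.Str.len]
    rw [PySem.List.slice_to_natCast]
  rw [h, List.prefix_iff_eq_take]

lemma question3Rec_iff (L : List String) :
    question3Rec L = true ↔ L.Pairwise (fun a b => ¬ pfx a b) := by
  induction L with
  | nil => simp [question3Rec]
  | cons c rest ih =>
    cases rest with
    | nil => simp [question3Rec]
    | cons d t =>
      rw [question3Rec]
      simp only [List.length_cons, List.length_eq_zero_iff, List.filter_eq_nil_iff,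
        Nat.succ_ne_zero, if_false, List.pairwise_cons]
      by_cases hall : ∀ num ∈ d :: t, ¬ (c = PySem.Str.slice num none (some (PySem.Str.len c)))
      · rw [if_pos (by simpa using hall), ih]
        simp only [slice_eq_iff_pfx] at hall
        simp only [List.pairwise_cons]
        constructor
        · intro h; exact ⟨hall, h⟩
        · intro h; exact h.2
      · rw [if_neg (by simpa using hall)]
        simp only [slice_eq_iff_pfx] at hall
        rw [not_forall] at hall
        obtain ⟨num, hnum⟩ := hall
        rw [Classical.not_imp, not_not] at hnum
        simp only [Bool.false_eq_true, false_iff]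
        intro hp
        exact hp.1 num hnum.1 hnum.2

-- symmetrised relation: invariant under permutation
def nosym (a b : String) : Prop := ¬ pfx a b ∧ ¬ pfx b a

lemma nosym_symm : Symmetric nosym := fun _ _ h => ⟨h.2, h.1⟩

-- on a list ordered by R with R a b → pfx b a → pfx a b, the one-sided and symmetrised
-- pairwise conditions agree
lemma pairwise_nosym_iff {R : String → String → Prop} {L : List String}
    (hR : L.Pairwise R) (himp : ∀ a b, R a b → pfx b a → pfx a b) :
    (L.Pairwise fun a b => ¬ pfx a b) ↔ L.Pairwise nosym := by
  constructor
  · intro h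
    exact (hR.and h).imp (fun {a b} ⟨hr, hn⟩ => ⟨hn, fun hba => hn (himp a b hr hba)⟩)
  · intro h; exact h.imp (fun {a b} hab => hab.1)

lemma len_imp (a b : String) (h : PySem.Str.len a ≤ PySem.Str.len b) (hba : pfx b a) : pfx a b := by
  have hl : b.toList.length ≤ a.toList.length := hba.length_le
  have hl' : a.toList.length ≤ b.toList.length := by
    simp [PySem.Str.len] at h; exact_mod_cast h
  have := hba.eq_of_length (le_antisymm hl (by omega))
  rw [pfx, this]

lemma le_imp (a b : String) (h : a ≤ b) (hba : pfx b a) : pfx a b := by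
  rcases lex_le_of_prefix hba with hlt | heq
  · exact absurd (String.lt_iff_toList_lt.mpr (List.lex_lt.mp hlt)) (not_lt.mpr h)
  · rw [pfx, ← heq]

lemma alt_iff_chain (s : List String) :
    ((s.zip (PySem.List.slice s (some 1) none)).all (fun p => !(PySem.Str.startswith p.2 p.1))) = true
      ↔ s.IsChain (fun a b => ¬ pfx a b) := by
  rw [PySem.List.slice_from_one]
  induction s with
  | nil => simp
  | cons a t ih =>
    cases t with
    | nil => simp [List.IsChain.singleton]
    | cons b t' =>
      rw [List.isChain_cons_cons, ← ih]
      simp only [List.tail_cons, List.zip_cons_cons, List.all_cons, Bool.and_eq_true,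
        Bool.not_eq_eq_eq_not, Bool.not_true, PySem.Str.startswith_eq, pfx]
      rw [← PySem.Chars.startswith_iff]
      simp

lemma chain_iff_pairwise {s : List String} (hs : s.Pairwise (· ≤ ·)) :
    s.IsChain (fun a b => ¬ pfx a b) ↔ s.Pairwise (fun a b => ¬ pfx a b) := by
  constructor
  · intro hc
    induction s with
    | nil => exact List.Pairwise.nil
    | cons a t ih =>
      rw [List.pairwise_cons] at hs ⊢
      refine ⟨?_, ih hs.2 hc.of_cons⟩
      intro z hz hpz
      cases t with
      | nil => cases hz
      | cons b t' =>
        have hab : ¬ pfx a b := (List.isChain_cons_cons.mp hc).1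
        have hbz : b ≤ z := by
          rcases List.mem_cons.mp hz with rfl | hz'
          · exact le_refl _
          · exact (List.pairwise_cons.mp hs.2).1 z hz'
        exact hab (prefix_of_between (le_toList (hs.1 b (List.mem_cons_self)))
          (le_toList hbz) hpz)
  · intro hp; exact hp.isChain


-- ===== VERDICT (by name: the statement is the Claim_ definition above) =====
theorem question3_spec : Claim_equal_question3 := by
  intro numbers _ _
  unfold Spec_question3 question3 question3_alt
  rw [Bool.eq_iff_iff]
  rw [question3Rec_iff, alt_iff_chain,
      chain_iff_pairwise (by simpa using PySem.List.sorted_pairwise numbers (fun x => x))]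
  rw [pairwise_nosym_iff (PySem.List.sorted_pairwise numbers (fun s => PySem.Str.len s)) len_imp,
      pairwise_nosym_iff (PySem.List.sorted_pairwise numbers (fun x => x)) le_imp]
  constructor
  · intro h
    exact h.perm ((PySem.List.sorted_perm numbers (fun s => PySem.Str.len s) false).trans
      (PySem.List.sorted_perm numbers (fun x => x) false).symm) (fun h => nosym_symm h)
  · intro h
    exact h.perm ((PySem.List.sorted_perm numbers (fun x => x) false).trans
      (PySem.List.sorted_perm numbers (fun s => PySem.Str.len s) false).symm) (fun h => nosym_symm h)
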